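-- pv_equiv track=rewrite | github.com/anshulsacheti/EECS-4750-ObjectTracking | mainCPU.py | countSlopeChange2
-- ===== SOURCE A (Python) =====
-- def countSlopeChange2(slopesBetweenJumps):
--
--     countSides = 0
--     currSlope2 = 10000
--     runningTotal = 0
--
--     for x in slopesBetweenJumps:
--
--        if(x == currSlope2):
--           runningTotal += 1
--        else:
--           currSlope2 = x
--           runningTotal = 0
--
--        if(runningTotal == 3):
--           countSides += 1
--
--     return countSides
-- ===== SOURCE B (Python) =====
-- def countSlopeChange2(slopesBetweenJumps):
--     # Pass 1: run-length encode the sequence with a 10000 sentinel run at the front.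
--     lengths = []
--     cur = 10000
--     n = 1
--     for x in slopesBetweenJumps:
--         if x == cur:
--             n += 1
--         else:
--             lengths.append(n)
--             cur = x
--             n = 1
--     lengths.append(n)
--     # Pass 2: each run of length >= 4 contributes exactly one counted side.
--     return sum(1 for L in lengths if L >= 4)
-- ===== Notes on version B (the rewrite author's own statement) =====
-- stated objective: alternative
-- what changed: Replaces the streaming counter-with-reset (countSides/currSlope2/runningTotal updated per element) by a two-pass run-length encoding (with the 10000 initialization expressed as a length-1 sentinel run) followed by counting runs of length >= 4.
import Mathlib
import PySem

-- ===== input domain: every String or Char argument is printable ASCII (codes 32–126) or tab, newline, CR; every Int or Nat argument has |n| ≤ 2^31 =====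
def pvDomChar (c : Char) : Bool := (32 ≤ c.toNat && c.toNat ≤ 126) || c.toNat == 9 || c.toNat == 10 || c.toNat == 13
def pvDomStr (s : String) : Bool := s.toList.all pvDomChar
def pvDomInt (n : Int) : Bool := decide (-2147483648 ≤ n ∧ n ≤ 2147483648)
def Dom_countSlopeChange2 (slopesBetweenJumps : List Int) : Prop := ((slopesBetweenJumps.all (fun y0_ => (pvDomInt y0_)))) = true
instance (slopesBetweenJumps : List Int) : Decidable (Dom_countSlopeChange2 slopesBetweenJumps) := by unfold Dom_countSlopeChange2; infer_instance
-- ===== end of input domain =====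

-- B replaces A's streaming counter-with-reset by a two-pass run-length encoding
-- (sentinel 10000 run in front) followed by counting runs of length >= 4 (objective: alternative).

-- ===== PORT A =====
-- loop body of A: state = (countSides, currSlope2, runningTotal)
def pvStepA (s : Int × Int × Int) (x : Int) : Int × Int × Int :=
  let cur' := if x = s.2.1 then s.2.1 else x
  let rt'  := if x = s.2.1 then s.2.2 + 1 else 0
  ((if rt' = 3 then s.1 + 1 else s.1), cur', rt')

def countSlopeChange2 (slopesBetweenJumps : List Int) : Int :=
  (slopesBetweenJumps.foldl pvStepA (0, 10000, 0)).1

-- ===== PORT B =====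
-- emits the length of each maximal run; cur/n start as the sentinel run (10000, 1)
def pvRunGo (cur : Int) (n : Nat) : List Int → List Nat
  | [] => [n]
  | x :: xs => if x = cur then pvRunGo cur (n + 1) xs else n :: pvRunGo x 1 xs

def countSlopeChange2_alt (slopesBetweenJumps : List Int) : Int :=
  (((pvRunGo 10000 1 slopesBetweenJumps).filter (fun L => 4 ≤ L)).length : Int)

-- ===== PRECONDITION & SPEC =====
def Spec_countSlopeChange2 (slopesBetweenJumps : List Int) (out : Int) : Prop := out = countSlopeChange2_alt slopesBetweenJumps
instance (slopesBetweenJumps : List Int) (out : Int) : Decidable (Spec_countSlopeChange2 slopesBetweenJumps out) := by unfold Spec_countSlopeChange2; infer_instance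

-- ===== CLAIM (what is proved, stated in full; the proofs are below) =====
def Claim_equal_countSlopeChange2 : Prop := ∀ (slopesBetweenJumps : List Int), Dom_countSlopeChange2 slopesBetweenJumps → Spec_countSlopeChange2 slopesBetweenJumps (countSlopeChange2 slopesBetweenJumps)

-- ===== LEMMAS AND PROOFS =====

-- number of runs of length ≥ 4 among the emitted run lengths
def pvCountGE4 (ls : List Nat) : Int := ((ls.filter (fun L => 4 ≤ L)).length : Int)

-- Invariant: from state (c, cur, rt) with the current run having length rt+1,
-- A's remaining fold equals c plus the number of ≥4 runs B will emit, minus 1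
-- if the current run was already counted (rt ≥ 3).
theorem pv_inv (xs : List Int) : ∀ (c cur : Int) (rt : Nat),
    (xs.foldl pvStepA (c, cur, (rt : Int))).1
      = c + pvCountGE4 (pvRunGo cur (rt + 1) xs) - (if 3 ≤ rt then 1 else 0) := by
  induction xs with
  | nil =>
      intro c cur rt
      simp only [List.foldl_nil, pvRunGo, pvCountGE4, List.filter]
      by_cases h : 3 ≤ rt
      · simp [h, show 4 ≤ rt + 1 by omega]
      · simp [h, show ¬ 4 ≤ rt + 1 by omega]
  | cons x xs ih =>
      intro c cur rt
      rw [List.foldl_cons]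
      by_cases hx : x = cur
      · have ih' := ih (if ((rt:Int) + 1) = 3 then c + 1 else c) cur (rt + 1)
        rw [show (((rt + 1 : Nat)) : Int) = (rt : Int) + 1 by push_cast; ring] at ih'
        have hs : pvStepA (c, cur, (rt : Int)) x
            = ((if ((rt:Int) + 1) = 3 then c + 1 else c), cur, (rt : Int) + 1) := by
          simp [pvStepA, hx]
        rw [hs, ih']
        have hr : pvRunGo cur (rt + 1) (x :: xs) = pvRunGo cur (rt + 1 + 1) xs := by
          simp [pvRunGo, hx]
        rw [hr]
        split_ifs <;> omega
      · have ih' := ih c x 0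
        simp only [Nat.cast_zero, Nat.zero_add] at ih'
        have hs : pvStepA (c, cur, (rt : Int)) x = (c, x, (0 : Int)) := by
          simp [pvStepA, hx]
        have hr : pvRunGo cur (rt + 1) (x :: xs) = (rt + 1) :: pvRunGo x 1 xs := by
          simp [pvRunGo, hx]
        rw [hs, ih', hr]
        simp only [pvCountGE4, List.filter_cons, decide_eq_true_eq]
        by_cases h4 : 4 ≤ rt + 1
        · rw [if_pos h4, List.length_cons]
          push_cast
          split_ifs <;> omega
        · rw [if_neg h4]
          split_ifs <;> omega

-- ===== VERDICT (by name: the statement is the Claim_ definition above) =====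
theorem countSlopeChange2_spec : Claim_equal_countSlopeChange2 := by
  intro xs _
  unfold Spec_countSlopeChange2 countSlopeChange2 countSlopeChange2_alt
  have h := pv_inv xs 0 10000 0
  simp only [Nat.cast_zero] at h
  rw [h]
  simp [pvCountGE4]
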